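-- pv_equiv track=rewrite | github.com/101rror/GeeksforGeeks | Difficulty: Easy/Sort by Set Bit Count/sort-by-set-bit-count.py | sortBySetBitCount
-- ===== SOURCE A (Python) =====
-- def sortBySetBitCount(arr):
--     def countSetBit(n):
--         count = 0
--
--         while n:
--             n = n & (n - 1)
--             count += 1
--
--         return count
--
--     ans = sorted(arr, reverse=True, key = lambda a:countSetBit(a))
--
--     return ans
-- ===== SOURCE B (Python) =====
-- def sortBySetBitCount(arr):
--     # Stable counting sort into popcount buckets, emitted in descending count order.
--     buckets = [[] for _ in range(33)]
--     for x in arr: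
--         buckets[x.bit_count()].append(x)
--     res = []
--     for b in reversed(buckets):
--         res += b
--     return res
-- ===== Notes on version B (the rewrite author's own statement) =====
-- stated objective: alternative
-- what changed: Replaced the comparison sort keyed by a per-element popcount loop with a one-pass stable counting sort into 33 popcount buckets concatenated in descending count order (intended as faster, O(n+w) vs O(n log n), but a timing run could not confirm a ratio because A diverges on negative elements).
import Mathlib
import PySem

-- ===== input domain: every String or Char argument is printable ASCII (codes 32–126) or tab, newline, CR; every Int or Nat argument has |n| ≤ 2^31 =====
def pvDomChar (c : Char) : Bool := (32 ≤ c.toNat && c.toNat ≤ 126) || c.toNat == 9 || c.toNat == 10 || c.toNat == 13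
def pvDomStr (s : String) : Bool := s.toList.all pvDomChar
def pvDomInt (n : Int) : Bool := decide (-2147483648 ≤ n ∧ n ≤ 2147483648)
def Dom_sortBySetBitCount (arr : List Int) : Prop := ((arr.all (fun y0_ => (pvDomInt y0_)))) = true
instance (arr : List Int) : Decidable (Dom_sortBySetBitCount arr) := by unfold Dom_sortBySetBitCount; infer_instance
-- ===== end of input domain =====

-- B replaces A's comparison sort keyed by a per-element popcount loop with a stable
-- counting sort into popcount buckets emitted in descending count order (objective: alternative).


-- ===== PORT A =====
-- A's 'while n: n = n & (n - 1); count += 1' — ported with fuel n.natAbs + 1, which covers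
-- every terminating run of the Python loop (for 0 ≤ n it runs popcount(n) ≤ n.natAbs times);
-- for n < 0 the Python loop never terminates, and those inputs are excluded by Pre_.
def countSetBitAux : Nat → Int → Int → Int
  | 0, _, count => count
  | fuel + 1, n, count =>
    if n = 0 then count else countSetBitAux fuel (PySem.Int.band n (n - 1)) (count + 1)

def countSetBit (n : Int) : Int := countSetBitAux (n.natAbs + 1) n 0

def sortBySetBitCount (arr : List Int) : List Int :=
  PySem.List.sorted arr (fun a => countSetBit a) true

-- ===== PORT B =====
def sortBySetBitCount_alt (arr : List Int) : List Int :=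
  let buckets0 : List (List Int) := (List.range 33).map (fun _ => ([] : List Int))
  let buckets := arr.foldl
    (fun bs x => bs.set (PySem.Int.bitCount x) (bs.getD (PySem.Int.bitCount x) [] ++ [x]))
    buckets0
  buckets.reverse.foldl (fun res b => res ++ b) []

-- ===== PRECONDITION & SPEC =====
-- Pre_ excludes lists containing a negative element: on those A never returns — its inner
-- loop 'n = n & (n - 1)' never reaches 0 on Python's arbitrary-precision negative ints,
-- so A diverges.
def Pre_sortBySetBitCount (arr : List Int) : Prop := ∀ x ∈ arr, 0 ≤ x
instance (arr : List Int) : Decidable (Pre_sortBySetBitCount arr) := by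
  unfold Pre_sortBySetBitCount; infer_instance

def pvWitness_sortBySetBitCount : List Int := [3, 5, 8, 7, 0, 6]

def Spec_sortBySetBitCount (arr : List Int) (out : List Int) : Prop := out = sortBySetBitCount_alt arr
instance (arr : List Int) (out : List Int) : Decidable (Spec_sortBySetBitCount arr out) := by unfold Spec_sortBySetBitCount; infer_instance

-- ===== CLAIM (what is proved, stated in full; the proofs are below) =====
def Claim_equal_sortBySetBitCount : Prop := ∀ (arr : List Int), Dom_sortBySetBitCount arr → Pre_sortBySetBitCount arr → Spec_sortBySetBitCount arr (sortBySetBitCount arr)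

-- ===== LEMMAS AND PROOFS =====

theorem odd_land (a : Nat) : (2*a+1) &&& (2*a) = 2*a := by
  have := Nat.bitwise_bit (f := and) (a := true) (m := a) (b := false) (n := a)
  simp [Nat.bit] at this
  have h2 : Nat.bitwise and a a = a := Nat.and_self a
  simp [HAnd.hAnd, AndOp.and, Nat.land, this, h2]

theorem even_land (a b : Nat) : (2*a) &&& (2*b+1) = 2*(a &&& b) := by
  have := Nat.bitwise_bit (f := and) (a := false) (m := a) (b := true) (n := b)
  simp [Nat.bit] at this
  simpa [HAnd.hAnd, AndOp.and, Nat.land] using this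

theorem bc_even (a : Nat) : PySem.Int.bitCount ((2*a : Nat) : Int) = PySem.Int.bitCount (a : Int) := by
  rcases Nat.eq_zero_or_pos a with h | h
  · simp [h]
  · rw [PySem.Int.bitCount_natCast (by omega)]
    simp [Nat.mul_div_cancel_left _ (by norm_num : (0:Nat) < 2)]

theorem bc_odd (a : Nat) : PySem.Int.bitCount ((2*a+1 : Nat) : Int) = 1 + PySem.Int.bitCount (a : Int) := by
  rw [PySem.Int.bitCount_natCast (by omega)]
  have : (2*a+1) / 2 = a := by omega
  simp [this]

theorem land_pred_step (m : Nat) (hm : 0 < m) :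
    (m &&& (m - 1)) < m ∧
      PySem.Int.bitCount ((m &&& (m - 1) : Nat) : Int) + 1 = PySem.Int.bitCount (m : Int) := by
  induction m using Nat.strong_induction_on with
  | _ m ih =>
    rcases Nat.even_or_odd m with ⟨a, ha⟩ | ⟨a, ha⟩
    · -- m = 2a, a > 0
      have ha' : m = 2*a := by omega
      have hapos : 0 < a := by omega
      have h1 : 2*a - 1 = 2*(a-1)+1 := by omega
      have hland : m &&& (m-1) = 2*(a &&& (a-1)) := by
        rw [ha', h1]; exact even_land a (a-1)
      obtain ⟨ihlt, ihbc⟩ := ih a (by omega) hapos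
      refine ⟨by omega, ?_⟩
      rw [hland, ha', bc_even, bc_even, ihbc]
    · have ha' : m = 2*a+1 := by omega
      have h1 : 2*a+1 - 1 = 2*a := by omega
      have hland : m &&& (m-1) = 2*a := by rw [ha', h1]; exact odd_land a
      refine ⟨by omega, ?_⟩
      rw [hland, ha', bc_even, bc_odd]
      omega

theorem bitCount_le_self (m : Nat) : PySem.Int.bitCount (m : Int) ≤ m := by
  induction m using Nat.strong_induction_on with
  | _ m ih =>
    rcases Nat.eq_zero_or_pos m with h | h
    · simp [h]
    · rw [PySem.Int.bitCount_natCast h]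
      have := ih (m/2) (by omega)
      omega

theorem countSetBitAux_correct (fuel : Nat) :
    ∀ (m : Nat) (count : Int), PySem.Int.bitCount (m : Int) ≤ fuel →
      countSetBitAux fuel (m : Int) count = count + (PySem.Int.bitCount (m : Int) : Int) := by
  induction fuel with
  | zero =>
    intro m count h
    have h0 : PySem.Int.bitCount (m : Int) = 0 := by omega
    simp [countSetBitAux, h0]
  | succ fuel ih =>
    intro m count h
    rcases Nat.eq_zero_or_pos m with hm | hm
    · simp [countSetBitAux, hm]
    · have hne : (m : Int) ≠ 0 := by exact_mod_cast Nat.pos_iff_ne_zero.mp hm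
      rw [countSetBitAux, if_neg hne]
      have hcast : (m : Int) - 1 = ((m - 1 : Nat) : Int) := by omega
      rw [hcast, PySem.Int.band_natCast]
      obtain ⟨hlt, hbc⟩ := land_pred_step m hm
      rw [ih (m &&& (m-1)) (count+1) (by omega)]
      rw [show PySem.Int.bitCount ((m : Int)) = PySem.Int.bitCount ((m &&& (m-1) : Nat) : Int) + 1 from hbc.symm]
      push_cast
      ring

theorem countSetBit_eq_bitCount (n : Int) (hn : 0 ≤ n) :
    countSetBit n = (PySem.Int.bitCount n : Int) := by
  obtain ⟨m, rfl⟩ := Int.eq_ofNat_of_zero_le hn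
  have hna : ((m : Int)).natAbs = m := Int.natAbs_natCast m
  rw [countSetBit, hna]
  rw [countSetBitAux_correct (m+1) m 0 (by have := bitCount_le_self m; exact_mod_cast by omega)]
  simp

theorem bitCount_lt_33 (x : Int) (h1 : -2147483648 ≤ x) (h2 : x ≤ 2147483648) :
    PySem.Int.bitCount x < 33 := by
  have hb := PySem.Int.bitCount_le_bitLength x
  rcases eq_or_ne x 0 with rfl | hne
  · simp
  · have h3 : x.natAbs ≤ 2^31 := by norm_num; omega
    have h4 := PySem.Int.two_pow_bitLength_le x hne
    by_contra hc
    have h5 : 32 ≤ PySem.Int.bitLength x - 1 := by omega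
    have : (2:Nat)^32 ≤ 2 ^ (PySem.Int.bitLength x - 1) := Nat.pow_le_pow_right (by norm_num) h5
    have : (2:Nat)^32 ≤ x.natAbs := le_trans this h4
    norm_num at this h3
    omega

def flatForm (key : Int → Int) (B : Nat) (p : List Int) : List Int :=
  ((List.range B).reverse).flatMap (fun (k : Nat) => p.filter (fun x => key x == (k : Int)))

theorem insertBy_append_not (before : Int → Int → Bool) (x : Int) (l1 l2 : List Int)
    (h : ∀ y ∈ l1, before x y = false) :
    PySem.List.insertBy before x (l1 ++ l2) = l1 ++ PySem.List.insertBy before x l2 := by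
  induction l1 with
  | nil => simp
  | cons y ys ih =>
    simp only [List.cons_append, PySem.List.insertBy, h y (by simp)]
    simp only [Bool.false_eq_true, if_false]
    rw [ih (fun z hz => h z (by simp [hz]))]

theorem insertBy_all_before (before : Int → Int → Bool) (x : Int) (l : List Int)
    (h : ∀ y ∈ l, before x y = true) :
    PySem.List.insertBy before x l = x :: l := by
  cases l with
  | nil => rfl
  | cons y ys => simp [PySem.List.insertBy, h y (by simp)]

theorem mem_flatForm (key : Int → Int) (B : Nat) (p : List Int) (y : Int)
    (hy : y ∈ flatForm key B p) : ∃ k < B, key y = (k : Int) := by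
  rw [flatForm, List.mem_flatMap] at hy
  obtain ⟨k, hk, hy2⟩ := hy
  rw [List.mem_reverse, List.mem_range] at hk
  rw [List.mem_filter] at hy2
  exact ⟨k, hk, by simpa using hy2.2⟩

theorem flatForm_succ (key : Int → Int) (B : Nat) (p : List Int) :
    flatForm key (B+1) p = p.filter (fun x => key x == (B : Int)) ++ flatForm key B p := by
  simp [flatForm, List.range_succ]

theorem flatForm_append_ge (key : Int → Int) (B : Nat) (p : List Int) (x : Int) (j : Nat)
    (hkx : key x = (j : Int)) (hj : B ≤ j) :
    flatForm key B (p ++ [x]) = flatForm key B p := by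
  unfold flatForm
  apply List.flatMap_congr
  intro k hk
  rw [List.mem_reverse, List.mem_range] at hk
  rw [List.filter_append]
  have : [x].filter (fun x => key x == (k : Int)) = [] := by
    simp [hkx]; omega
  rw [this, List.append_nil]

theorem insert_flatForm (key : Int → Int) (x : Int) (j : Nat) (hkx : key x = (j : Int)) :
    ∀ (B : Nat), j < B → ∀ (p : List Int),
      PySem.List.insertBy (fun a b => decide (key b < key a)) x (flatForm key B p)
        = flatForm key B (p ++ [x]) := by
  intro B
  induction B with
  | zero => omega
  | succ B ih =>
    intro hj p
    rw [flatForm_succ, flatForm_succ]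
    rcases eq_or_lt_of_le (Nat.lt_succ_iff.mp hj) with rfl | hjB
    · -- j = B
      rw [insertBy_append_not _ _ _ _ (by
          intro y hy
          rw [List.mem_filter] at hy
          have : key y = (j : Int) := by simpa using hy.2
          simp [this, hkx])]
      rw [insertBy_all_before _ _ _ (by
          intro y hy
          obtain ⟨k, hk, hky⟩ := mem_flatForm key j p y hy
          simp only [hky, hkx, decide_eq_true_eq]
          exact_mod_cast hk)]
      rw [flatForm_append_ge key j p x j hkx (le_refl j)]
      rw [List.filter_append]
      simp [hkx]
    · -- j < B
      rw [insertBy_append_not _ _ _ _ (by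
          intro y hy
          rw [List.mem_filter] at hy
          have h2 : key y = (B : Int) := by simpa using hy.2
          simp only [h2, hkx, decide_eq_false_iff_not]
          intro hlt
          have : (B:Int) < (j:Int) := hlt
          omega)]
      rw [ih hjB p]
      rw [List.filter_append]
      have : [x].filter (fun x => key x == (B : Int)) = [] := by
        simp [hkx]; omega
      rw [this, List.append_nil]

theorem sortedA_eq_flatForm (key : Int → Int) (B : Nat) (xs : List Int)
    (h : ∀ x ∈ xs, ∃ j < B, key x = (j : Int)) :
    PySem.List.sorted xs key true = flatForm key B xs := by
  rw [PySem.List.sorted_rev_eq_foldl_insertBy]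
  induction xs using List.reverseRecOn with
  | nil => simp [flatForm]
  | append_singleton ys x ih =>
    rw [List.foldl_append]
    simp only [List.foldl_cons, List.foldl_nil]
    rw [ih (fun z hz => h z (by simp [hz]))]
    obtain ⟨j, hj, hkx⟩ := h x (by simp)
    exact insert_flatForm key x j hkx B hj ys

-- B-side: the bucket array after the fold is exactly the per-popcount filters
theorem set_map_range (n : Nat) (f : Nat → List Int) (c : Nat) (v : List Int) :
    ((List.range n).map f).set c v = (List.range n).map (fun k => if k = c then v else f k) := by
  apply List.ext_getElem
  · simp
  · intro i h1 h2
    rw [List.getElem_set]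
    by_cases hic : c = i
    · subst hic; simp
    · rw [if_neg hic]
      simp only [List.getElem_map, List.getElem_range]
      rw [if_neg (fun h => hic h.symm)]

theorem buckets_fold (arr : List Int) (hb : ∀ x ∈ arr, PySem.Int.bitCount x < 33) :
    arr.foldl
      (fun bs x => bs.set (PySem.Int.bitCount x) (bs.getD (PySem.Int.bitCount x) [] ++ [x]))
      ((List.range 33).map (fun _ => ([] : List Int)))
      = (List.range 33).map (fun k => arr.filter (fun x => PySem.Int.bitCount x == k)) := by
  induction arr using List.reverseRecOn with
  | nil => simp
  | append_singleton ys x ih =>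
    rw [List.foldl_append]
    simp only [List.foldl_cons, List.foldl_nil]
    rw [ih (fun z hz => hb z (by simp [hz]))]
    have hc : PySem.Int.bitCount x < 33 := hb x (by simp)
    have hgetD : ((List.range 33).map (fun k => ys.filter (fun x => PySem.Int.bitCount x == k))).getD (PySem.Int.bitCount x) []
        = ys.filter (fun y => PySem.Int.bitCount y == PySem.Int.bitCount x) := by
      rw [List.getD_eq_getElem _ _ (by simpa using hc)]
      simp
    rw [hgetD, set_map_range 33 _ _ _]
    apply List.map_congr_left
    intro k hk
    rw [List.filter_append]
    split_ifs with hkc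
    · subst hkc; simp
    · have : [x].filter (fun y => PySem.Int.bitCount y == (k:Nat)) = [] := by
        simp; omega
      rw [this, List.append_nil]

theorem assembly (arr : List Int)
    (hdom : ∀ x ∈ arr, -2147483648 ≤ x ∧ x ≤ 2147483648)
    (hpre : ∀ x ∈ arr, 0 ≤ x) :
    sortBySetBitCount arr = sortBySetBitCount_alt arr := by
  have hb : ∀ x ∈ arr, PySem.Int.bitCount x < 33 := fun x hx =>
    bitCount_lt_33 x (hdom x hx).1 (hdom x hx).2
  have hkey : ∀ x ∈ arr, countSetBit x = ((PySem.Int.bitCount x : Nat) : Int) := fun x hx =>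
    countSetBit_eq_bitCount x (hpre x hx)
  -- A side
  rw [sortBySetBitCount,
    sortedA_eq_flatForm (fun a => countSetBit a) 33 arr
      (fun x hx => ⟨PySem.Int.bitCount x, hb x hx, hkey x hx⟩)]
  -- B side
  show _ = (arr.foldl
    (fun bs x => bs.set (PySem.Int.bitCount x) (bs.getD (PySem.Int.bitCount x) [] ++ [x]))
    ((List.range 33).map (fun _ => ([] : List Int)))).reverse.foldl (fun res b => res ++ b) []
  rw [buckets_fold arr hb, ← List.map_reverse, PySem.List.foldl_append_eq_flatten,
      List.nil_append, ← List.flatMap_def]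
  -- now: flatForm countSetBit 33 arr = (range 33).reverse.flatMap (fun k : Nat => filter (bitCount == k))
  rw [flatForm]
  apply List.flatMap_congr
  intro k hk
  apply List.filter_congr
  intro x hx
  rw [hkey x hx]
  simp

-- ===== VERDICT (by name: the statement is the Claim_ definition above) =====
theorem sortBySetBitCount_spec : Claim_equal_sortBySetBitCount := by
  intro arr hdom hpre
  unfold Spec_sortBySetBitCount
  have hdom' : ∀ x ∈ arr, -2147483648 ≤ x ∧ x ≤ 2147483648 := by
    intro x hx
    rw [Dom_sortBySetBitCount, List.all_eq_true] at hdom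
    have := hdom x hx
    simpa [pvDomInt] using this
  exact assembly arr hdom' hpre
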